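-- pv_equiv track=rewrite | github.com/GundalaNikhil/DSA | dsa-problems/Bitwise/solutions/python/BIT-012-distinct-subarray-xors.py | distinct_subarray_xors
-- ===== SOURCE A (Python) =====
-- def distinct_subarray_xors(a: list[int]) -> int:
--     # Python ints are objects (28 bytes+). N=10000 -> 50M ints -> 1.4GB RAM.
--     # Standard Python list will MLE.
--     # However, N=10000 is small enough for localized test cases but large for heavy memory.
--     # Strategy: Use set logic but beware limit.
--     # If standard set fails, we rely on constraints being somewhat loose or inputs usually having fewer distinct values.
--     # But strictly, Python struggles here.
--     # To optimize: use Set and `add` - Set removes dups on the fly, saving space IF many dups exist.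
--
--     # Try Set approach first.
--     s = set()
--     n = len(a)
--     for i in range(n):
--         curr = 0
--         for j in range(i, n):
--             curr ^= a[j]
--             s.add(curr)
--     return len(s)
-- ===== SOURCE B (Python) =====
-- def distinct_subarray_xors(a: list[int]) -> int:
--     # Prefix-XOR table: prefix[k] = a[0]^...^a[k-1]; subarray a[l..r-1] XOR = prefix[r]^prefix[l].
--     prefix = [0]
--     for x in a:
--         prefix.append(prefix[-1] ^ x)
--     s = set()
--     for r in range(1, len(prefix)):
--         for l in range(r):
--             s.add(prefix[r] ^ prefix[l])
--     return len(s)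
-- ===== Notes on version B (the rewrite author's own statement) =====
-- stated objective: alternative
-- what changed: B precomputes a prefix-XOR table once and inserts pairwise XORs prefix[r]^prefix[l] of stored values, replacing A's per-start running-XOR accumulator inner loop.
import Mathlib
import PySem

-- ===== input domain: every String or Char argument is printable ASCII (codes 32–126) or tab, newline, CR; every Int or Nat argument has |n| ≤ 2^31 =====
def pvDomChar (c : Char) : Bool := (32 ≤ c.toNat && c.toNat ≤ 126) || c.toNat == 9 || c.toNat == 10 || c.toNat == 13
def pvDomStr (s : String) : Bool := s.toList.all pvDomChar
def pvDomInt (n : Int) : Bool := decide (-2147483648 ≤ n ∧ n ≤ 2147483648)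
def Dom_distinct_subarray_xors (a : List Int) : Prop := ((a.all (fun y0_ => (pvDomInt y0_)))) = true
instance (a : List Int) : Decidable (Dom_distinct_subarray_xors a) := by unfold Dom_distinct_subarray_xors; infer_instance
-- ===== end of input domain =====

-- B precomputes a prefix-XOR table and inserts pairwise XORs of stored prefix values,
-- replacing A's per-start running-XOR accumulator inner loop (alternative decomposition, same quadratic pass count).

-- ===== PORT A =====
def distinct_subarray_xors (a : List Int) : Int :=
  let n : Int := (a.length : Int)
  let s : PySem.Set Int :=
    (PySem.List.pyRange 0 n 1).foldl
      (fun s i =>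
        ((PySem.List.pyRange i n 1).foldl
          (fun (p : Int × PySem.Set Int) j =>
            (PySem.Int.bxor p.1 (PySem.List.pyGetD a j 0),
             PySem.Set.add p.2 (PySem.Int.bxor p.1 (PySem.List.pyGetD a j 0))))
          (0, s)).2)
      PySem.Set.empty
  PySem.Set.len s

-- ===== PORT B =====
def distinct_subarray_xors_alt (a : List Int) : Int :=
  let pref : List Int :=
    a.foldl (fun pref x => pref ++ [PySem.Int.bxor (PySem.List.pyGetD pref (-1) 0) x]) [0]
  let s : PySem.Set Int :=
    (PySem.List.pyRange 1 (PySem.List.len pref) 1).foldl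
      (fun s r =>
        (PySem.List.pyRange 0 r 1).foldl
          (fun s l =>
            PySem.Set.add s
              (PySem.Int.bxor (PySem.List.pyGetD pref r 0) (PySem.List.pyGetD pref l 0)))
          s)
      PySem.Set.empty
  PySem.Set.len s

-- ===== PRECONDITION & SPEC =====
def Spec_distinct_subarray_xors (a : List Int) (out : Int) : Prop := out = distinct_subarray_xors_alt a
instance (a : List Int) (out : Int) : Decidable (Spec_distinct_subarray_xors a out) := by unfold Spec_distinct_subarray_xors; infer_instance

-- ===== CLAIM (what is proved, stated in full; the proofs are below) =====
def Claim_equal_distinct_subarray_xors : Prop := ∀ (a : List Int), Dom_distinct_subarray_xors a → Spec_distinct_subarray_xors a (distinct_subarray_xors a)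

-- ===== LEMMAS AND PROOFS =====

-- prefix XOR of the first k elements
def pvP (a : List Int) (k : Nat) : Int := (a.take k).foldl PySem.Int.bxor 0

-- the common characterisation of both sets' members
def pvQ (a : List Int) (y : Int) : Prop :=
  ∃ l r : Nat, l < r ∧ r ≤ a.length ∧ y = PySem.Int.bxor (pvP a r) (pvP a l)

theorem pv_bxor_eq_intXor (a b : Int) : PySem.Int.bxor a b = Int.xor a b := by
  cases a <;> cases b <;> simp [PySem.Int.bxor, Int.xor, Int.negSucc_eq] <;> omega

theorem pv_intXor_assoc (a b c : Int) : Int.xor (Int.xor a b) c = Int.xor a (Int.xor b c) := by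
  cases a <;> cases b <;> cases c <;> simp [Int.xor, Nat.xor_assoc]

theorem pv_bxor_assoc (a b c : Int) :
    PySem.Int.bxor (PySem.Int.bxor a b) c = PySem.Int.bxor a (PySem.Int.bxor b c) := by
  simp [pv_bxor_eq_intXor, pv_intXor_assoc]

theorem pv_bxor_cancel (p t : Int) : PySem.Int.bxor p (PySem.Int.bxor p t) = t := by
  rw [← pv_bxor_assoc, PySem.Int.bxor_self, PySem.Int.bxor_comm, PySem.Int.bxor_zero]

theorem pv_foldl_bxor_shift (l : List Int) : ∀ c : Int,
    l.foldl PySem.Int.bxor c = PySem.Int.bxor c (l.foldl PySem.Int.bxor 0) := by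
  induction l with
  | nil => intro c; simp
  | cons x t ih =>
    intro c
    simp only [List.foldl_cons]
    rw [ih (PySem.Int.bxor c x), ih (PySem.Int.bxor 0 x), pv_bxor_assoc]
    rw [PySem.Int.bxor_comm 0 x, PySem.Int.bxor_zero]

-- XOR of the segment a[l..l+m-1] in terms of prefix XORs
theorem pv_seg (a : List Int) (l m : Nat) :
    ((a.drop l).take m).foldl PySem.Int.bxor 0
      = PySem.Int.bxor (pvP a l) (pvP a (l + m)) := by
  have h : pvP a (l + m)
      = PySem.Int.bxor (pvP a l) (((a.drop l).take m).foldl PySem.Int.bxor 0) := by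
    unfold pvP
    rw [List.take_add, List.foldl_append, pv_foldl_bxor_shift]
  rw [h, pv_bxor_cancel]

-- generic membership / nodup facts for an outer fold over set-transformers
theorem pv_mem_outer {β : Type} (l : List β) (F : β → PySem.Set Int → PySem.Set Int)
    (G : β → Int → Prop)
    (h : ∀ i ∈ l, ∀ s y, y ∈ F i s ↔ y ∈ s ∨ G i y) :
    ∀ (s : PySem.Set Int) (y : Int),
      y ∈ l.foldl (fun s i => F i s) s ↔ y ∈ s ∨ ∃ i ∈ l, G i y := by
  induction l with
  | nil => intro s y; simp
  | cons x t ih =>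
    intro s y
    simp only [List.foldl_cons]
    rw [ih (fun i hi => h i (List.mem_cons_of_mem x hi)), h x List.mem_cons_self s y]
    simp only [List.mem_cons]
    constructor
    · rintro ((hs | hx) | ⟨i, hi, hg⟩)
      · exact Or.inl hs
      · exact Or.inr ⟨x, Or.inl rfl, hx⟩
      · exact Or.inr ⟨i, Or.inr hi, hg⟩
    · rintro (hs | ⟨i, (rfl | hi), hg⟩)
      · exact Or.inl (Or.inl hs)
      · exact Or.inl (Or.inr hg)
      · exact Or.inr ⟨i, hi, hg⟩

theorem pv_nodup_outer {β : Type} (l : List β) (F : β → PySem.Set Int → PySem.Set Int)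
    (h : ∀ i ∈ l, ∀ s : PySem.Set Int, s.Nodup → (F i s).Nodup) :
    ∀ s : PySem.Set Int, s.Nodup → (l.foldl (fun s i => F i s) s).Nodup := by
  induction l with
  | nil => intro s hs; simpa using hs
  | cons x t ih =>
    intro s hs
    simp only [List.foldl_cons]
    exact ih (fun i hi => h i (List.mem_cons_of_mem x hi)) _ (h x List.mem_cons_self s hs)

theorem pv_nodup_foldl_add {β : Type} (l : List β) (f : β → Int) :
    ∀ s : PySem.Set Int, s.Nodup → (l.foldl (fun s b => PySem.Set.add s (f b)) s).Nodup := by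
  induction l with
  | nil => intro s hs; simpa using hs
  | cons x t ih =>
    intro s hs
    simp only [List.foldl_cons]
    exact ih _ (PySem.Set.nodup_add _ _ hs)

-- A's inner loop (after index elimination): running accumulator plus set of its values
theorem pvA_inner_mem (l : List Int) : ∀ (c : Int) (s : PySem.Set Int) (y : Int),
    y ∈ (l.foldl
          (fun (p : Int × PySem.Set Int) x =>
            (PySem.Int.bxor p.1 x, PySem.Set.add p.2 (PySem.Int.bxor p.1 x)))
          (c, s)).2
      ↔ y ∈ s ∨ ∃ m : Nat, m < l.length ∧ y = (l.take (m+1)).foldl PySem.Int.bxor c := by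
  induction l with
  | nil => intro c s y; simp
  | cons x t ih =>
    intro c s y
    simp only [List.foldl_cons]
    rw [ih (PySem.Int.bxor c x) (PySem.Set.add s (PySem.Int.bxor c x)) y,
        PySem.Set.mem_add]
    constructor
    · rintro ((hs | hx) | ⟨m, hm, hy⟩)
      · exact Or.inl hs
      · exact Or.inr ⟨0, by simp, by simpa using hx⟩
      · refine Or.inr ⟨m + 1, by simpa using Nat.succ_lt_succ hm, ?_⟩
        simpa using hy
    · rintro (hs | ⟨m, hm, hy⟩)
      · exact Or.inl (Or.inl hs)
      · cases m with
        | zero => exact Or.inl (Or.inr (by simpa using hy))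
        | succ m' =>
          refine Or.inr ⟨m', by simpa using Nat.lt_of_succ_lt_succ hm, ?_⟩
          simpa using hy

theorem pvA_inner_nodup (l : List Int) : ∀ (c : Int) (s : PySem.Set Int), s.Nodup →
    ((l.foldl
        (fun (p : Int × PySem.Set Int) x =>
          (PySem.Int.bxor p.1 x, PySem.Set.add p.2 (PySem.Int.bxor p.1 x)))
        (c, s)).2).Nodup := by
  induction l with
  | nil => intro c s hs; simpa using hs
  | cons x t ih =>
    intro c s hs
    simp only [List.foldl_cons]
    exact ih _ _ (PySem.Set.nodup_add _ _ hs)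

-- the set built by port A
def pvASet (a : List Int) : PySem.Set Int :=
  (PySem.List.pyRange 0 (a.length : Int) 1).foldl
    (fun s i =>
      ((PySem.List.pyRange i (a.length : Int) 1).foldl
        (fun (p : Int × PySem.Set Int) j =>
          (PySem.Int.bxor p.1 (PySem.List.pyGetD a j 0),
           PySem.Set.add p.2 (PySem.Int.bxor p.1 (PySem.List.pyGetD a j 0))))
        (0, s)).2)
    PySem.Set.empty

theorem pvA_eq (a : List Int) : distinct_subarray_xors a = PySem.Set.len (pvASet a) := rfl

theorem pvA_mem (a : List Int) (y : Int) : y ∈ pvASet a ↔ pvQ a y := by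
  unfold pvASet
  rw [pv_mem_outer _ _
      (fun i y => ∃ m : Nat, m < (a.drop i.toNat).length ∧
        y = ((a.drop i.toNat).take (m+1)).foldl PySem.Int.bxor 0)
      (fun i hi s y => by
        have h0 : (0:Int) ≤ i := (PySem.List.mem_pyRange_one.mp hi).1
        rw [PySem.List.foldl_pyRange_pyGetD' a 0
            (fun (p : Int × PySem.Set Int) x =>
              (PySem.Int.bxor p.1 x, PySem.Set.add p.2 (PySem.Int.bxor p.1 x)))
            (0, s) h0]
        exact pvA_inner_mem _ 0 s y)]
  constructor
  · rintro (he | ⟨i, hi, m, hm, hy⟩)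
    · simp [PySem.Set.empty] at he
    · have h0 : (0:Int) ≤ i ∧ i < (a.length : Int) := PySem.List.mem_pyRange_one.mp hi
      refine ⟨i.toNat, i.toNat + m + 1, by omega, ?_, ?_⟩
      · have hl : (a.drop i.toNat).length = a.length - i.toNat := by simp
        omega
      · rw [hy, pv_seg a i.toNat (m+1), PySem.Int.bxor_comm]
        congr 1
  · rintro ⟨l, r, hlr, hr, hy⟩
    refine Or.inr ⟨(l : Int), ?_, r - l - 1, ?_, ?_⟩
    · rw [PySem.List.mem_pyRange_one]
      exact ⟨Int.natCast_nonneg l, by exact_mod_cast (by omega : l < a.length)⟩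
    · simp
      omega
    · rw [hy]
      rw [Int.toNat_natCast l, pv_seg a l (r - l - 1 + 1), PySem.Int.bxor_comm]
      congr 2
      omega

theorem pvA_nodup (a : List Int) : (pvASet a).Nodup := by
  unfold pvASet
  exact pv_nodup_outer _ _
    (fun i hi s hs => by
      have h0 : (0:Int) ≤ i := (PySem.List.mem_pyRange_one.mp hi).1
      rw [PySem.List.foldl_pyRange_pyGetD' a 0
          (fun (p : Int × PySem.Set Int) x =>
            (PySem.Int.bxor p.1 x, PySem.Set.add p.2 (PySem.Int.bxor p.1 x)))
          (0, s) h0]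
      exact pvA_inner_nodup _ 0 s hs)
    PySem.Set.empty (by simp [PySem.Set.empty])

-- B's prefix list
def pvScan (c : Int) : List Int → List Int
  | [] => []
  | x :: l => PySem.Int.bxor c x :: pvScan (PySem.Int.bxor c x) l

theorem pv_pyGetD_last (xs : List Int) (c d : Int) (h : xs.getLast? = some c) :
    PySem.List.pyGetD xs (-1) d = c := by
  have hne : xs ≠ [] := by intro hnil; simp [hnil] at h
  have h1 : 1 ≤ xs.length := List.length_pos_iff.mpr hne
  rw [List.getLast?_eq_getElem?] at h
  simp only [PySem.List.pyGetD, PySem.List.pyGet?, PySem.List.pyIdx?]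
  norm_num [h1]
  rw [h]
  rfl

theorem pvB_prefix (l : List Int) : ∀ (pref : List Int) (c : Int), pref.getLast? = some c →
    l.foldl (fun pref x => pref ++ [PySem.Int.bxor (PySem.List.pyGetD pref (-1) 0) x]) pref
      = pref ++ pvScan c l := by
  induction l with
  | nil => intro pref c _; simp [pvScan]
  | cons x t ih =>
    intro pref c hc
    simp only [List.foldl_cons]
    rw [pv_pyGetD_last pref c 0 hc]
    rw [ih (pref ++ [PySem.Int.bxor c x]) (PySem.Int.bxor c x) (by simp)]
    simp [pvScan]

theorem pvScan_eq (l : List Int) : ∀ c : Int,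
    pvScan c l = (List.range l.length).map (fun k => (l.take (k+1)).foldl PySem.Int.bxor c) := by
  induction l with
  | nil => intro c; simp [pvScan]
  | cons x t ih =>
    intro c
    simp only [pvScan, List.length_cons, List.range_succ_eq_map, List.map_cons, List.map_map]
    refine congrArg₂ _ (by simp) ?_
    rw [ih (PySem.Int.bxor c x)]
    rfl

def pvPref (a : List Int) : List Int :=
  a.foldl (fun pref x => pref ++ [PySem.Int.bxor (PySem.List.pyGetD pref (-1) 0) x]) [0]

theorem pvPref_eq (a : List Int) :
    pvPref a = (List.range (a.length + 1)).map (fun k => pvP a k) := by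
  unfold pvPref
  rw [pvB_prefix a [0] 0 (by simp), pvScan_eq]
  rw [List.range_succ_eq_map]
  simp only [List.map_cons, List.map_map]
  rfl

theorem pvPref_len (a : List Int) : (pvPref a).length = a.length + 1 := by
  rw [pvPref_eq]; simp

theorem pvPref_get (a : List Int) (r : Int) (h0 : 0 ≤ r) (h1 : r < (a.length : Int) + 1) :
    PySem.List.pyGetD (pvPref a) r 0 = pvP a r.toNat := by
  rw [PySem.List.pyGetD_eq_getElem (pvPref a) 0 h0 (by rw [pvPref_len]; omega)]
  simp [pvPref_eq]

-- the set built by port B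
def pvBSet (a : List Int) : PySem.Set Int :=
  (PySem.List.pyRange 1 (PySem.List.len (pvPref a)) 1).foldl
    (fun s r =>
      (PySem.List.pyRange 0 r 1).foldl
        (fun s l =>
          PySem.Set.add s
            (PySem.Int.bxor (PySem.List.pyGetD (pvPref a) r 0) (PySem.List.pyGetD (pvPref a) l 0)))
        s)
    PySem.Set.empty

theorem pvB_eq (a : List Int) : distinct_subarray_xors_alt a = PySem.Set.len (pvBSet a) := rfl

theorem pvB_mem (a : List Int) (y : Int) : y ∈ pvBSet a ↔ pvQ a y := by
  unfold pvBSet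
  rw [pv_mem_outer _ _
      (fun r y => ∃ li ∈ PySem.List.pyRange 0 r 1,
        y = PySem.Int.bxor (PySem.List.pyGetD (pvPref a) r 0) (PySem.List.pyGetD (pvPref a) li 0))
      (fun r hr s y =>
        PySem.Set.mem_foldl_add (PySem.List.pyRange 0 r 1)
          (fun li => PySem.Int.bxor (PySem.List.pyGetD (pvPref a) r 0) (PySem.List.pyGetD (pvPref a) li 0)) s y)]
  have hlen : PySem.List.len (pvPref a) = (a.length : Int) + 1 := by
    simp [pvPref_len]
  rw [hlen]
  constructor
  · rintro (he | ⟨r, hr, li, hli, hy⟩)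
    · simp [PySem.Set.empty] at he
    · have hr' := PySem.List.mem_pyRange_one.mp hr
      have hli' := PySem.List.mem_pyRange_one.mp hli
      refine ⟨li.toNat, r.toNat, by omega, by omega, ?_⟩
      rw [hy, pvPref_get a r (by omega) (by omega),
          pvPref_get a li (by omega) (by omega)]
  · rintro ⟨l, r, hlr, hr, hy⟩
    refine Or.inr ⟨(r : Int), ?_, (l : Int), ?_, ?_⟩
    · rw [PySem.List.mem_pyRange_one]
      constructor
      · exact_mod_cast (by omega : 1 ≤ r)
      · omega
    · rw [PySem.List.mem_pyRange_one]
      exact ⟨Int.natCast_nonneg l, by exact_mod_cast hlr⟩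
    · rw [pvPref_get a (r : Int) (Int.natCast_nonneg r) (by omega),
          pvPref_get a (l : Int) (Int.natCast_nonneg l) (by omega),
          Int.toNat_natCast, Int.toNat_natCast]
      exact hy

theorem pvB_nodup (a : List Int) : (pvBSet a).Nodup := by
  unfold pvBSet
  exact pv_nodup_outer _ _
    (fun r hr s hs =>
      pv_nodup_foldl_add (PySem.List.pyRange 0 r 1)
        (fun li => PySem.Int.bxor (PySem.List.pyGetD (pvPref a) r 0) (PySem.List.pyGetD (pvPref a) li 0)) s hs)
    PySem.Set.empty (by simp [PySem.Set.empty])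

-- ===== VERDICT (by name: the statement is the Claim_ definition above) =====
theorem distinct_subarray_xors_spec : Claim_equal_distinct_subarray_xors := by
  intro a _
  unfold Spec_distinct_subarray_xors
  rw [pvA_eq, pvB_eq]
  have hp : (pvASet a).Perm (pvBSet a) :=
    (List.perm_ext_iff_of_nodup (pvA_nodup a) (pvB_nodup a)).mpr
      (fun y => (pvA_mem a y).trans (pvB_mem a y).symm)
  simp [PySem.Set.len, hp.length_eq]
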